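-- pv_equiv track=rewrite | github.com/lee-seul/baekjoon | 4606.py | to_encoding
-- ===== SOURCE A (Python) =====
-- def to_encoding(string):
--     charsets = [
--         ("%", "%25"), ("(", "%28"), (")", "%29"),
--         (" ", "%20"), ("!", "%21"), ("$", "%24"),
--         ("*", "%2a")
--     ]
--     for charset in charsets:
--         string = string.replace(charset[0], charset[1])
--     return string
-- ===== SOURCE B (Python) =====
-- def to_encoding(string):
--     table = {
--         "%": "%25", "(": "%28", ")": "%29",
--         " ": "%20", "!": "%21", "$": "%24",
--         "*": "%2a",
--     }
--     return ''.join(table.get(c, c) for c in string)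
-- ===== Notes on version B (the rewrite author's own statement) =====
-- stated objective: idiomatic
-- what changed: Replaced seven sequential full-string .replace passes by a single character-level pass that translates each character once through a lookup table and joins the pieces.
import Mathlib
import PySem

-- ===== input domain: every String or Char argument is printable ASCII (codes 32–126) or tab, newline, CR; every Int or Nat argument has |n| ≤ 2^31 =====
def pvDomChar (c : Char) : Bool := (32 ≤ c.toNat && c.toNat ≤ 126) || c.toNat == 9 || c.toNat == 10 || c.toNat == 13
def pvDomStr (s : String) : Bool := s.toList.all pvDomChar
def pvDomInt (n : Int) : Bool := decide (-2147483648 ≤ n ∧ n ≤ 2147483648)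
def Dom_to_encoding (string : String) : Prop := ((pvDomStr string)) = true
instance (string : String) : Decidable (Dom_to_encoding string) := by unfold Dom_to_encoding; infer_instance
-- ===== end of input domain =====

-- B translates each character once through a lookup table in a single pass instead of
-- A's seven sequential full-string .replace passes; objective: more idiomatic, same result.


-- ===== PORT A =====
-- charsets list, then one .replace pass per pair, accumulated over `string`
def to_encoding (string : String) : String :=
  let charsets : List (String × String) :=
    [("%", "%25"), ("(", "%28"), (")", "%29"),
     (" ", "%20"), ("!", "%21"), ("$", "%24"),
     ("*", "%2a")]
  charsets.foldl (fun s charset => PySem.Str.replace s charset.1 charset.2) string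

-- ===== PORT B =====
-- the dict literal (keys are the 1-char strings, here Char per the iteration over `string`)
def pvTable : PySem.Dict Char String :=
  ((((((PySem.Dict.empty.insert '%' "%25").insert '(' "%28").insert ')' "%29").insert
      ' ' "%20").insert '!' "%21").insert '$' "%24").insert '*' "%2a"

-- ''.join(table.get(c, c) for c in string)
def to_encoding_alt (string : String) : String :=
  PySem.Str.join "" (string.toList.map (fun c => pvTable.getD c (String.singleton c)))

-- ===== PRECONDITION & SPEC =====
def Spec_to_encoding (string : String) (out : String) : Prop := out = to_encoding_alt string
instance (string : String) (out : String) : Decidable (Spec_to_encoding string out) := by unfold Spec_to_encoding; infer_instance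

-- ===== CLAIM (what is proved, stated in full; the proofs are below) =====
def Claim_equal_to_encoding : Prop := ∀ (string : String), Dom_to_encoding string → Spec_to_encoding string (to_encoding string)

-- ===== LEMMAS AND PROOFS =====

-- single-character replace is a per-character flatMap
theorem replace_go_single (c : Char) (r : List Char) :
    ∀ (l acc : List Char) (fuel : Nat), l.length ≤ fuel →
      PySem.Chars.replace.go [c] r fuel l acc
        = acc.reverse ++ l.flatMap (fun x => if x = c then r else [x]) := by
  intro l
  induction l with
  | nil =>
    intro acc fuel _
    cases fuel <;> simp [PySem.Chars.replace.go]
  | cons x t ih =>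
    intro acc fuel hf
    cases fuel with
    | zero => simp at hf
    | succ n =>
      by_cases hx : x = c
      · subst hx
        simp only [PySem.Chars.replace.go, List.isPrefixOf]
        rw [if_pos (by simp)]
        rw [show List.drop [x].length (x :: t) = t from rfl]
        rw [ih _ n (by simpa using hf)]
        simp only [List.reverse_append, List.reverse_reverse, List.flatMap_cons,
          if_true, List.append_assoc]
      · simp only [PySem.Chars.replace.go, List.isPrefixOf]
        rw [if_neg (by simp only [beq_iff_eq, Bool.and_eq_true]; exact fun h => hx h.1.symm)]
        rw [ih _ n (by simpa using hf)]
        simp only [List.reverse_cons, List.flatMap_cons, if_neg hx,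
          List.append_assoc, List.singleton_append]

theorem replace_single (s : List Char) (c : Char) (r : List Char) :
    PySem.Chars.replace s [c] r = s.flatMap (fun x => if x = c then r else [x]) := by
  simp [PySem.Chars.replace, replace_go_single c r s [] s.length le_rfl]

-- per-character composition of A's seven replaces equals B's table lookup
theorem per_char_eq (c : Char) :
    (List.flatMap (fun x =>
      List.flatMap (fun x =>
        List.flatMap (fun x =>
          List.flatMap (fun x =>
            List.flatMap (fun x =>
              List.flatMap (fun x => if x = '*' then "%2a".toList else [x])
                (if x = '$' then "%24".toList else [x]))
              (if x = '!' then "%21".toList else [x]))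
            (if x = ' ' then "%20".toList else [x]))
          (if x = ')' then "%29".toList else [x]))
        (if x = '(' then "%28".toList else [x]))
      (if c = '%' then "%25".toList else [c]))
      = (pvTable.getD c (String.singleton c)).toList := by
  by_cases h1 : c = '%'; · subst h1; decide
  by_cases h2 : c = '('; · subst h2; decide
  by_cases h3 : c = ')'; · subst h3; decide
  by_cases h4 : c = ' '; · subst h4; decide
  by_cases h5 : c = '!'; · subst h5; decide
  by_cases h6 : c = '$'; · subst h6; decide
  by_cases h7 : c = '*'; · subst h7; decide
  have hget : pvTable.getD c (String.singleton c) = String.singleton c := by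
    simp only [pvTable, PySem.Dict.getD_insert, if_neg h1, if_neg h2, if_neg h3,
      if_neg h4, if_neg h5, if_neg h6, if_neg h7]
    simp [PySem.Dict.getD, PySem.Dict.empty, PySem.Dict.get?]
  rw [hget]
  simp [h1, h2, h3, h4, h5, h6, h7]

-- join with the empty separator is concatenation of the pieces
theorem join_empty_flatten (ps : List (List Char)) :
    PySem.Chars.join [] ps = ps.flatten := by
  induction ps with
  | nil => simp [PySem.Chars.join, List.intercalate]
  | cons p t ih =>
    cases t with
    | nil => simp [PySem.Chars.join_singleton]
    | cons q u => simpa [PySem.Chars.join_cons_cons] using congrArg (p ++ ·) ih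

-- ===== VERDICT (by name: the statement is the Claim_ definition above) =====
set_option maxHeartbeats 1000000 in
theorem to_encoding_spec : Claim_equal_to_encoding := by
  intro s _
  unfold Spec_to_encoding to_encoding to_encoding_alt
  simp only [List.foldl_cons, List.foldl_nil]
  simp only [PySem.Str.replace, PySem.Str.join, String.toList_ofList]
  refine congrArg String.ofList ?_
  rw [(show ("%".toList) = ['%'] by decide), (show ("(".toList) = ['('] by decide),
      (show (")".toList) = [')'] by decide), (show (" ".toList) = [' '] by decide),
      (show ("!".toList) = ['!'] by decide), (show ("$".toList) = ['$'] by decide),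
      (show ("*".toList) = ['*'] by decide), (show ("".toList) = ([] : List Char) by decide)]
  simp only [replace_single, List.flatMap_assoc, join_empty_flatten, List.map_map,
    List.flatten_eq_flatMap, List.flatMap_map, Function.comp, id_eq]
  exact List.flatMap_congr (fun c _ => per_char_eq c)
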